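-- pv_equiv track=rewrite | github.com/amelie-iska/ThermoGFN-IF | scripts/rf3/prepare_reactzyme_rf3_msas.py | _extract_first_a3m_query_sequence
-- ===== SOURCE A (Python) =====
-- def _extract_first_a3m_query_sequence(a3m_text: str) -> str:
--     sequence_lines: list[str] = []
--     started = False
--     for line in a3m_text.splitlines():
--         if line.startswith(">"):
--             if started:
--                 break
--             started = True
--             continue
--         if started:
--             sequence_lines.append(line.strip())
--     return "".join(sequence_lines)
-- ===== SOURCE B (Python) =====
-- def _extract_first_a3m_query_sequence(a3m_text: str) -> str:
--     lines = a3m_text.splitlines()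
--     headers = [i for i, line in enumerate(lines) if line.startswith(">")]
--     if not headers:
--         return ""
--     start = headers[0] + 1
--     end = headers[1] if len(headers) > 1 else len(lines)
--     return "".join(line.strip() for line in lines[start:end])
-- ===== Notes on version B (the rewrite author's own statement) =====
-- stated objective: alternative
-- what changed: Instead of A's early-breaking scan with a mutable boolean state flag, B first builds the complete list of header-line indices with one enumerate-comprehension, then computes the block purely from the first two entries of that index list by slicing lines[headers[0]+1 : headers[1] or len].
import Mathlib
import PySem

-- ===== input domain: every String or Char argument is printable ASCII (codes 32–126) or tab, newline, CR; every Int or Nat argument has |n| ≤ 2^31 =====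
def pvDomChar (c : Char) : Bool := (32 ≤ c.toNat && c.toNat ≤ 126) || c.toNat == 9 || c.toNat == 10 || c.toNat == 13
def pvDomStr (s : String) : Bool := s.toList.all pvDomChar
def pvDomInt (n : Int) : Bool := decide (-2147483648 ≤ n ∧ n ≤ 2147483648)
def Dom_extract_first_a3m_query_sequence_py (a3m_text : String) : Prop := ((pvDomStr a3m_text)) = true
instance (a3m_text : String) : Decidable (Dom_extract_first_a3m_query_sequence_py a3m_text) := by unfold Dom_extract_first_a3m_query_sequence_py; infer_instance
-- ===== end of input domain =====

-- B replaces A's early-breaking flag-loop by building the full list of header-line indices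
-- once and slicing between the first two: alternative decomposition, not faster.

-- ===== PORT A =====
-- the for-loop over splitlines with the 'started' flag and the break at the second header
def pvA_loop : List String → Bool → List String → List String
  | [], _, acc => acc
  | l :: rest, started, acc =>
    if PySem.Str.startswith l ">" then
      if started then acc                     -- break
      else pvA_loop rest true acc             -- started = True; continue
    else if started then pvA_loop rest started (acc ++ [PySem.Str.strip l])
    else pvA_loop rest started acc

def extract_first_a3m_query_sequence_py (a3m_text : String) : String :=
  PySem.Str.join "" (pvA_loop (PySem.Str.splitlines a3m_text) false [])

-- ===== PORT B =====
-- headers = [i for i, line in enumerate(lines) if line.startswith(">")]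
def pvHdrIdxs (lines : List String) : List Int :=
  ((PySem.List.enumerate lines).filter (fun p => PySem.Str.startswith p.2 ">")).map Prod.fst

def extract_first_a3m_query_sequence_py_alt (a3m_text : String) : String :=
  let lines := PySem.Str.splitlines a3m_text
  match pvHdrIdxs lines with
  | [] => ""                                  -- if not headers: return ""
  | h0 :: rest =>
    let start := h0 + 1                       -- headers[0] + 1
    let stop : Int := match rest with         -- headers[1] if len(headers) > 1 else len(lines)
      | [] => (lines.length : Int)
      | h1 :: _ => h1
    PySem.Str.join "" ((PySem.List.slice lines (some start) (some stop)).map PySem.Str.strip)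

-- ===== PRECONDITION & SPEC =====
def Spec_extract_first_a3m_query_sequence_py (a3m_text : String) (out : String) : Prop := out = extract_first_a3m_query_sequence_py_alt a3m_text
instance (a3m_text : String) (out : String) : Decidable (Spec_extract_first_a3m_query_sequence_py a3m_text out) := by unfold Spec_extract_first_a3m_query_sequence_py; infer_instance

-- ===== CLAIM (what is proved, stated in full; the proofs are below) =====
def Claim_equal_extract_first_a3m_query_sequence_py : Prop := ∀ (a3m_text : String), Dom_extract_first_a3m_query_sequence_py a3m_text → Spec_extract_first_a3m_query_sequence_py a3m_text (extract_first_a3m_query_sequence_py a3m_text)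

-- ===== LEMMAS AND PROOFS =====

-- the loop predicate: line does NOT start with ">"
def pvNotHdr (l : String) : Bool := !(PySem.Str.startswith l ">")

-- A's loop once started collects the stripped lines up to the next header
theorem pvA_loop_true (ls : List String) (acc : List String) :
    pvA_loop ls true acc = acc ++ (ls.takeWhile pvNotHdr).map PySem.Str.strip := by
  induction ls generalizing acc with
  | nil => simp [pvA_loop]
  | cons l rest ih =>
    by_cases h : PySem.Chars.startswith l.toList ['>'] = true
    · simp [pvA_loop, h, pvNotHdr]
    · simp [pvA_loop, h, ih, pvNotHdr]

-- A's loop before the first header just skips lines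
theorem pvA_loop_false (ls : List String) (acc : List String) :
    pvA_loop ls false acc = pvA_loop ((ls.dropWhile pvNotHdr).drop 1) true acc := by
  induction ls with
  | nil => simp [pvA_loop]
  | cons l rest ih =>
    by_cases h : PySem.Chars.startswith l.toList ['>'] = true
    · simp [pvA_loop, h, pvNotHdr]
    · simp [pvA_loop, h, ih, pvNotHdr]

-- Nat-valued header indices, proof-side mirror of pvHdrIdxs
def pvHN : List String → List Nat
  | [] => []
  | l :: ls => if pvNotHdr l then (pvHN ls).map (· + 1) else 0 :: (pvHN ls).map (· + 1)

theorem pvHN_cons_not {l : String} (ls : List String) (h : pvNotHdr l = true) :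
    pvHN (l :: ls) = (pvHN ls).map (· + 1) := by simp [pvHN, h]

theorem pvHN_cons_hdr {l : String} (ls : List String) (h : pvNotHdr l = false) :
    pvHN (l :: ls) = 0 :: (pvHN ls).map (· + 1) := by simp [pvHN, h]

-- pvHdrIdxs, started at any offset, is pvHN shifted by that offset
theorem pvHdrIdxs_shift (ls : List String) (s : Int) :
    ((PySem.List.enumerate ls s).filter (fun p => PySem.Str.startswith p.2 ">")).map Prod.fst
      = (pvHN ls).map (fun (n : Nat) => (n : Int) + s) := by
  induction ls generalizing s with
  | nil => simp [pvHN, PySem.List.enumerate_nil]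
  | cons l rest ih =>
    rw [PySem.List.enumerate_cons, List.filter_cons]
    by_cases h : pvNotHdr l = true
    · have h' : (PySem.Str.startswith l ">") = false := by
        simpa [pvNotHdr] using h
      rw [pvHN_cons_not rest h]
      simp only [h', Bool.false_eq_true, if_false]
      rw [ih (s + 1), List.map_map]
      exact List.map_congr_left (fun n _ => by simp [Function.comp]; ring)
    · have h' : (PySem.Str.startswith l ">") = true := by
        have := h; simp [pvNotHdr] at this; simpa [pvNotHdr] using this
      rw [pvHN_cons_hdr rest (by simp [pvNotHdr]; simpa using h')]
      simp only [h', if_true, List.map_cons]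
      rw [ih (s + 1), List.map_map]
      refine List.cons_eq_cons.mpr ⟨by push_cast; ring, ?_⟩
      exact List.map_congr_left (fun n _ => by simp [Function.comp]; ring)

theorem pvHdrIdxs_eq (ls : List String) :
    pvHdrIdxs ls = (pvHN ls).map (fun (n : Nat) => (n : Int)) := by
  rw [pvHdrIdxs, pvHdrIdxs_shift ls 0]
  exact List.map_congr_left (fun n _ => by ring)

-- takeWhile pvNotHdr is the prefix up to the first header index
theorem pvTW (ls : List String) :
    ls.takeWhile pvNotHdr = ls.take ((pvHN ls).headD ls.length) := by
  induction ls with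
  | nil => simp
  | cons l rest ih =>
    by_cases h : pvNotHdr l = true
    · rw [pvHN_cons_not rest h, List.takeWhile_cons, if_pos h, ih]
      cases hr : pvHN rest with
      | nil => simp [hr]
      | cons n tl => simp [hr]
    · simp only [Bool.not_eq_true] at h
      rw [pvHN_cons_hdr rest h, List.takeWhile_cons]
      simp [h]

-- B's slice, abstracted over the header-index list
def pvBlockOf (len : Nat) (hs : List Nat) (ls : List String) : List String :=
  match hs with
  | [] => []
  | n0 :: rest => (ls.drop (n0 + 1)).take (rest.headD len - (n0 + 1))

-- the central list-level fact: B's slice is A's collected block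
theorem pvBlock (ls : List String) :
    pvBlockOf ls.length (pvHN ls) ls
      = ((ls.dropWhile pvNotHdr).drop 1).takeWhile pvNotHdr := by
  induction ls with
  | nil => simp [pvHN, pvBlockOf]
  | cons l rest ih =>
    by_cases h : pvNotHdr l = true
    · -- l is not a header: everything shifts by one
      rw [pvHN_cons_not rest h, List.dropWhile_cons, if_pos h, ← ih]
      cases hr : pvHN rest with
      | nil => simp [hr, pvBlockOf]
      | cons n0 tl =>
        simp only [hr, List.map_cons, pvBlockOf, List.drop_succ_cons, List.length_cons]
        congr 1
        cases tl with
        | nil => simp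
        | cons n1 tl' => simp
    · -- l is a header: the block is the prefix of rest up to its first header
      simp only [Bool.not_eq_true] at h
      rw [pvHN_cons_hdr rest h, List.dropWhile_cons]
      simp only [h, Bool.false_eq_true, if_false, List.drop_succ_cons, List.drop_zero]
      rw [pvTW rest]
      cases hr : pvHN rest with
      | nil => simp [hr, pvBlockOf]
      | cons n1 tl => simp [hr, pvBlockOf]

theorem pv_main (ls : List String) :
    PySem.Str.join "" (pvA_loop ls false []) = (match pvHdrIdxs ls with
      | [] => ""
      | h0 :: rest =>
        PySem.Str.join "" ((PySem.List.slice ls (some (h0 + 1))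
          (some (match rest with | [] => (ls.length : Int) | h1 :: _ => h1))).map PySem.Str.strip)) := by
  rw [pvA_loop_false, pvA_loop_true, List.nil_append, ← pvBlock ls, pvHdrIdxs_eq]
  cases hn : pvHN ls with
  | nil => simp [pvBlockOf]; rfl
  | cons n0 tl =>
    simp only [List.map_cons, pvBlockOf]
    cases tl with
    | nil =>
      simp only [List.map_nil, List.headD]
      have h1 : ((n0 : Int)) + 1 = ((n0 + 1 : Nat) : Int) := by push_cast; ring
      rw [h1, PySem.List.slice_natCast]
    | cons n1 tl' =>
      simp only [List.map_cons, List.headD]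
      have h1 : ((n0 : Int)) + 1 = ((n0 + 1 : Nat) : Int) := by push_cast; ring
      rw [h1, PySem.List.slice_natCast]

-- ===== VERDICT (by name: the statement is the Claim_ definition above) =====
theorem extract_first_a3m_query_sequence_py_spec : Claim_equal_extract_first_a3m_query_sequence_py := by
  intro t _
  unfold Spec_extract_first_a3m_query_sequence_py extract_first_a3m_query_sequence_py extract_first_a3m_query_sequence_py_alt
  exact pv_main (PySem.Str.splitlines t)
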